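-- pv_equiv track=rewrite | github.com/tchannagiri/DSBplot | utils/alignment_utils.py | get_variation_info
-- ===== SOURCE A (Python) =====
-- def get_variation_info(ref_align, read_align):
--   """
--     Get a list describing each variation in the alignment.
--     The list contains tuples of the form
--       (ref_pos, var_type, var_nucleotide)
--     where ref_pos is the position of the variation on the reference (1-based);
--     var_type is one of "insertion", "deletion", "substitution"; var_nucleotide
--     is the corresponding nucleotide in read_align. The reference position
--     assigned to insertions will be the one on the left of the insertion (upstream).
--   """
--   ref_i = 1
--   variation_info = []
--   for i in range(len(ref_align)):
--     if ref_align[i] != read_align[i]: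
--       if (ref_align[i] != '-') and (read_align[i] != '-'):
--         variation_info.append((ref_i, 'substitution', read_align[i]))
--       elif ref_align[i] == '-':
--         variation_info.append((ref_i - 1, 'insertion', read_align[i]))
--       elif read_align[i] == '-':
--         variation_info.append((ref_i, 'deletion', read_align[i]))
--       else:
--         raise Exception(
--           'Overlapping dashes in alignment: ' +
--           ref_align + ' ' + read_align
--         )
--     if ref_align[i] != '-':
--       ref_i += 1
--   return variation_info
-- ===== SOURCE B (Python) =====
-- def get_variation_info(ref_align, read_align):
--   def go(ref, read):
--     # Returns the variation list with LOCAL reference coordinates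
--     # (as if ref started the segment at position 1; an insertion at the
--     # very first column gets coordinate 0 = left of the segment).
--     n = len(ref)
--     if n == 0:
--       return []
--     if n == 1:
--       r, d = ref[0], read[0]
--       if r == d:
--         return []
--       if r == '-':
--         return [(0, 'insertion', d)]
--       if d == '-':
--         return [(1, 'deletion', d)]
--       return [(1, 'substitution', d)]
--     m = n // 2
--     shift = m - ref[:m].count('-')  # non-dash ref chars in the left half
--     return go(ref[:m], read[:m]) + \
--            [(p + shift, t, c) for (p, t, c) in go(ref[m:], read[m:])]
--   return go(ref_align, read_align)
-- ===== Notes on version B (the rewrite author's own statement) =====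
-- stated objective: alternative
-- what changed: Replaces A's single left-to-right scan with a threaded ref_i counter by a divide-and-conquer recursion: each half is solved independently in local coordinates and the right half's coordinates are shifted by the count of non-dash reference characters in the left half.
import Mathlib
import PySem

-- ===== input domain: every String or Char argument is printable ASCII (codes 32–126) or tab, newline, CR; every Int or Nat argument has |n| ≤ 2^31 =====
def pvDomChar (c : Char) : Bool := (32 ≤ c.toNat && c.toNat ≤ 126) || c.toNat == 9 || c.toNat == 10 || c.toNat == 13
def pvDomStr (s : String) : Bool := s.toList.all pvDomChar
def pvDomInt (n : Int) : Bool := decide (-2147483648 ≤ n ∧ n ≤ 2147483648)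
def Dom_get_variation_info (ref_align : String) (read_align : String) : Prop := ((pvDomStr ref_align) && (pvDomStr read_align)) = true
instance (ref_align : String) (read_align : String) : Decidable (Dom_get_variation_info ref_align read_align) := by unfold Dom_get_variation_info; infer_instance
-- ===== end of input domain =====

-- B replaces A's single scan with a threaded ref_i counter by a
-- divide-and-conquer recursion with coordinate shifting (objective: alternative).
-- ===== PORT A =====
-- A's for-loop over range(len(ref_align)), threading (ref_i, variation_info).
def pvGoA : List Char → List Char → Int → List (Int × String × String) → List (Int × String × String)
  | [], _, _, acc => acc
  | _ :: _, [], _, acc => acc   -- Python: read_align[i] raises IndexError here (excluded by Pre_)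
  | r :: rs, d :: ds, ref_i, acc =>
    let acc' :=
      if r ≠ d then
        if r ≠ '-' ∧ d ≠ '-' then acc ++ [(ref_i, "substitution", String.ofList [d])]
        else if r = '-' then acc ++ [(ref_i - 1, "insertion", String.ofList [d])]
        else if d = '-' then acc ++ [(ref_i, "deletion", String.ofList [d])]
        else acc   -- Python: raise Exception (unreachable: r = '-' ∧ d = '-' contradicts r ≠ d)
      else acc
    pvGoA rs ds (if r ≠ '-' then ref_i + 1 else ref_i) acc'

def get_variation_info (ref_align : String) (read_align : String) : List (Int × String × String) :=
  pvGoA ref_align.toList read_align.toList 1 []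

-- ===== PORT B =====
-- Source B's inner 'go': divide and conquer; slices ref[:m]/ref[m:] with
-- 0 ≤ m ≤ len(ref) are exactly take/drop.
def pvGoB : List Char → List Char → List (Int × String × String)
  | [], _ => []
  | [r], ds =>
      match ds.head? with
      | none => []   -- Python: read[0] raises IndexError here (excluded by Pre_)
      | some d =>
        if r = d then []
        else if r = '-' then [((0 : Int), "insertion", String.ofList [d])]
        else if d = '-' then [((1 : Int), "deletion", String.ofList [d])]
        else [((1 : Int), "substitution", String.ofList [d])]
  | r1 :: r2 :: rs', ds =>
      let n := (r1 :: r2 :: rs').length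
      let m := n / 2
      let shift : Int := (m : Int) - (((r1 :: r2 :: rs').take m).count '-' : Int)
      pvGoB ((r1 :: r2 :: rs').take m) (ds.take m) ++
        (pvGoB ((r1 :: r2 :: rs').drop m) (ds.drop m)).map (fun t => (t.1 + shift, t.2.1, t.2.2))
termination_by rs _ => rs.length
decreasing_by
  · simp only [List.length_take, List.length_cons]; omega
  · simp only [List.length_drop, List.length_cons]; omega

def get_variation_info_alt (ref_align : String) (read_align : String) : List (Int × String × String) :=
  pvGoB ref_align.toList read_align.toList

-- ===== PRECONDITION & SPEC =====
-- Pre_ excludes exactly the inputs where A raises IndexError (read shorter than ref).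
def Pre_get_variation_info (ref_align : String) (read_align : String) : Prop :=
  ref_align.toList.length ≤ read_align.toList.length
instance (ref_align : String) (read_align : String) : Decidable (Pre_get_variation_info ref_align read_align) := by
  unfold Pre_get_variation_info; infer_instance
def pvWitness_get_variation_info : String × String := ("A-C", "ATG")

def Spec_get_variation_info (ref_align : String) (read_align : String) (out : List (Int × String × String)) : Prop := out = get_variation_info_alt ref_align read_align
instance (ref_align : String) (read_align : String) (out : List (Int × String × String)) : Decidable (Spec_get_variation_info ref_align read_align out) := by unfold Spec_get_variation_info; infer_instance

-- ===== CLAIM =====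
def Claim_equal_get_variation_info : Prop := ∀ (ref_align : String) (read_align : String), Dom_get_variation_info ref_align read_align → Pre_get_variation_info ref_align read_align → Spec_get_variation_info ref_align read_align (get_variation_info ref_align read_align)

-- ===== LEMMAS AND PROOFS =====
-- Common reference spec: structural recursion, absolute base coordinate b.
def pvSpec : List Char → List Char → Int → List (Int × String × String)
  | [], _, _ => []
  | _ :: _, [], _ => []
  | r :: rs, d :: ds, b =>
    let rest := pvSpec rs ds (if r ≠ '-' then b + 1 else b)
    if r ≠ d then
      if r ≠ '-' ∧ d ≠ '-' then (b, "substitution", String.ofList [d]) :: rest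
      else if r = '-' then (b - 1, "insertion", String.ofList [d]) :: rest
      else if d = '-' then (b, "deletion", String.ofList [d]) :: rest
      else rest
    else rest

lemma pvGoA_eq_spec : ∀ (rs ds : List Char) (b : Int) (acc : List (Int × String × String)),
    pvGoA rs ds b acc = acc ++ pvSpec rs ds b := by
  intro rs
  induction rs with
  | nil => intro ds b acc; cases ds <;> simp [pvGoA, pvSpec]
  | cons r rs ih =>
    intro ds b acc
    cases ds with
    | nil => simp [pvGoA, pvSpec]
    | cons d ds =>
      simp only [pvGoA, pvSpec]
      rw [ih]
      split_ifs <;> simp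

lemma pvSpec_shift : ∀ (rs ds : List Char) (b k : Int),
    pvSpec rs ds (b + k) = (pvSpec rs ds b).map (fun t => (t.1 + k, t.2.1, t.2.2)) := by
  intro rs
  induction rs with
  | nil => intro ds b k; cases ds <;> simp [pvSpec]
  | cons r rs ih =>
    intro ds b k
    cases ds with
    | nil => simp [pvSpec]
    | cons d ds =>
      simp only [pvSpec]
      have e1 : b + k + 1 = b + 1 + k := by ring
      have e2 : b + k - 1 = b - 1 + k := by ring
      split_ifs <;> simp [ih, e1, e2]

lemma pvSpec_append : ∀ (as cs bs ds : List Char) (b : Int),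
    as.length = cs.length →
    pvSpec (as ++ bs) (cs ++ ds) b
      = pvSpec as cs b ++ pvSpec bs ds (b + ((as.length : Int) - (as.count '-' : Int))) := by
  intro as
  induction as with
  | nil =>
    intro cs bs ds b h
    have : cs = [] := List.eq_nil_of_length_eq_zero h.symm
    subst this; simp [pvSpec]
  | cons r as ih =>
    intro cs bs ds b h
    cases cs with
    | nil => simp at h
    | cons d cs =>
      simp only [List.length_cons, Nat.add_right_cancel_iff] at h
      simp only [List.cons_append, pvSpec]
      rw [ih cs bs ds _ h]
      have ecoord : (if r ≠ '-' then b + 1 else b) + ((as.length : Int) - (as.count '-' : Int))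
          = b + (((r :: as).length : Int) - ((r :: as).count '-' : Int)) := by
        by_cases hr : r = '-' <;> simp [hr, List.count_cons] <;> push_cast <;> ring
      rw [ecoord]
      split_ifs <;> simp

lemma pvGoB_eq_spec : ∀ (n : Nat) (rs ds : List Char), rs.length = n →
    rs.length ≤ ds.length → pvGoB rs ds = pvSpec rs ds 1 := by
  intro n
  induction n using Nat.strong_induction_on with
  | _ n ih =>
    intro rs ds hn hle
    match rs, ds with
    | [], _ => cases ds <;> simp [pvGoB, pvSpec]
    | [r], d :: ds =>
      simp only [pvGoB, List.head?, pvSpec]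
      by_cases hrd : r = d
      · simp [hrd]
      · by_cases hr : r = '-'
        · have hd : ¬ d = '-' := fun h => hrd (hr.trans h.symm)
          simp [pvSpec, hrd, hr, hd]
        · by_cases hd : d = '-'
          · simp [pvSpec, hrd, hr, hd]
          · simp [pvSpec, hrd, hr, hd]
    | [r], [] => simp at hle
    | r1 :: r2 :: rs', ds =>
      subst hn
      rw [pvGoB]
      set rs := r1 :: r2 :: rs' with hrs
      set m := rs.length / 2 with hm
      have hm1 : 1 ≤ m := by simp [hm, hrs]; omega
      have hmlt : m < rs.length := by simp [hm, hrs]; omega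
      have hlt : m ≤ ds.length := le_trans (le_of_lt hmlt) hle
      have htl : (rs.take m).length = m := by simp; omega
      have htl2 : (ds.take m).length = m := by simp; omega
      have h1 : pvGoB (rs.take m) (ds.take m) = pvSpec (rs.take m) (ds.take m) 1 := by
        apply ih m hmlt _ _ htl; omega
      have h2 : pvGoB (rs.drop m) (ds.drop m) = pvSpec (rs.drop m) (ds.drop m) 1 := by
        apply ih (rs.length - m) (by omega) _ _ (by simp) (by simp; omega)
      rw [h1, h2]
      have hsplit := pvSpec_append (rs.take m) (ds.take m) (rs.drop m) (ds.drop m) 1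
        (htl.trans htl2.symm)
      rw [List.take_append_drop, List.take_append_drop] at hsplit
      rw [hsplit, htl, pvSpec_shift]

theorem get_variation_info_spec : Claim_equal_get_variation_info := by
  intro ref_align read_align _ hpre
  unfold Spec_get_variation_info get_variation_info get_variation_info_alt
  rw [pvGoA_eq_spec, pvGoB_eq_spec ref_align.toList.length _ _ rfl hpre]
  simp
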